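-- pv_equiv track=rewrite | github.com/adanomad/embedding | backend/extract_pdf.py | normalize_sentence_lengths
-- ===== SOURCE A (Python) =====
-- def normalize_sentence_lengths(
--     sentences: list[str], min_chars: int, max_chars: int
-- ) -> list[str]:
--     """
--     Adjust sentences to ensure each is within the specified minimum and maximum character lengths.
--     Sentences shorter than min_chars are merged with subsequent sentences, and sentences longer
--     than max_chars are split at suitable points.
--     """
--
--     processed_sentences = []
--     i = 0
--
--     # First pass: merge short sentences
--     while i < len(sentences):
--         current_sentence = sentences[i]
--         if len(current_sentence) < min_chars and i + 1 < len(sentences):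
--             # Ensure not to exceed list bounds
--             next_sentence = sentences[i + 1]
--             merged_sentence = current_sentence + " " + next_sentence
--             # Check if the merged sentence still needs to be split (if it exceeds max_chars)
--             if len(merged_sentence) <= max_chars or max_chars == -1:
--                 processed_sentences.append(merged_sentence)
--                 i += 2  # Skip the next sentence as it's merged
--             else:
--                 # If merging results in a sentence longer than max_chars, don't merge
--                 processed_sentences.append(current_sentence)
--                 i += 1  # Only increment by 1 to re-evaluate next_sentence in the next loop
--         else:
--             processed_sentences.append(current_sentence)
--             i += 1
--
--     # Second pass: split long sentences
--     final_sentences = []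
--     for sentence in processed_sentences:
--         if len(sentence) > max_chars and max_chars != -1:
--             split_index = max(
--                 sentence.rfind(",", 0, max_chars), sentence.rfind(".", 0, max_chars)
--             )
--             if split_index != -1:
--                 # Split the sentence at the last comma/period before max_chars
--                 first_part = sentence[: split_index + 1]
--                 second_part = sentence[split_index + 2 :].strip()
--                 final_sentences.extend([first_part, second_part])
--             else:
--                 # No suitable split point, append the sentence as is
--                 final_sentences.append(sentence)
--         else:
--             # Sentence is within the acceptable length range
--             final_sentences.append(sentence)
--
--     return final_sentences
-- ===== SOURCE B (Python) =====
-- def normalize_sentence_lengths(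
--     sentences: list[str], min_chars: int, max_chars: int
-- ) -> list[str]:
--     """Single for-loop state machine with a deferred 'carry' sentence instead of
--     index look-ahead, and a left-to-right last-separator scan instead of rfind."""
--
--     out = []
--
--     def emit(s):
--         # split-once: scan the bounded prefix once for the last ',' or '.'
--         if max_chars == -1 or len(s) <= max_chars:
--             out.append(s)
--             return
--         idx = -1
--         for j, ch in enumerate(s[:max_chars]):
--             if ch in ",.":
--                 idx = j
--         if idx == -1:
--             out.append(s)
--         else:
--             out.append(s[: idx + 1])
--             out.append(s[idx + 2 :].strip())
--
--     carry = None  # a short sentence waiting for a partner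
--     for s in sentences:
--         if carry is not None:
--             merged = carry + " " + s
--             if max_chars == -1 or len(merged) <= max_chars:
--                 emit(merged)
--                 carry = None
--                 continue
--             emit(carry)
--             carry = None
--         if len(s) < min_chars:
--             carry = s
--         else:
--             emit(s)
--     if carry is not None:
--         emit(carry)
--     return out
-- ===== Notes on version B (the rewrite author's own statement) =====
-- stated objective: alternative
-- what changed: A's two staged passes (an index look-ahead while-loop that merges short sentences into an intermediate list, then a split pass using two bounded rfind calls) become a single for-loop state machine that defers a short sentence in a 'carry' slot and, for splitting, finds the last ',' or '.' by one left-to-right scan of the bounded prefix instead of rfind+max.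
import Mathlib
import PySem

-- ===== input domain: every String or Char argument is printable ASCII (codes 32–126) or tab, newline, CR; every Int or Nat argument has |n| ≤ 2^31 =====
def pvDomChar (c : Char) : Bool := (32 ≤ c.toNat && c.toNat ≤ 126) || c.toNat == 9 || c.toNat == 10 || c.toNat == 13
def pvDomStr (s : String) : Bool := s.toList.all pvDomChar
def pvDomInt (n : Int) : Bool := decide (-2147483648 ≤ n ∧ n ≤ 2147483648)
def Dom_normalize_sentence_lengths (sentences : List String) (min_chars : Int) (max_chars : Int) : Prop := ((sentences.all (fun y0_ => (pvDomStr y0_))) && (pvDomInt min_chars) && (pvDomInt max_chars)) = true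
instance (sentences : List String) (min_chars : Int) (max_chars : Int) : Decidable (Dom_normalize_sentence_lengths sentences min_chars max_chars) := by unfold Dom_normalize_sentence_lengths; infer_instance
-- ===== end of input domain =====

-- B replaces A's two staged passes (index look-ahead merge loop building an intermediate
-- list, then a split pass with two rfind calls) by a single for-loop state machine with a
-- deferred 'carry' sentence and a left-to-right last-separator scan; same return value.

-- ===== PORT A =====
-- first pass of A: the while loop merging short sentences (strings as List Char)
def pvMergeLoop (ss : List (List Char)) (min_chars max_chars : Int) (i : Nat) : List (List Char) :=
  if h : i < ss.length then
    if h2 : (Int.ofNat (ss[i]).length) < min_chars ∧ i + 1 < ss.length then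
      if (Int.ofNat ((ss[i] ++ [' '] ++ ss[i+1]'h2.2).length)) ≤ max_chars ∨ max_chars = -1 then
        (ss[i] ++ [' '] ++ ss[i+1]'h2.2) :: pvMergeLoop ss min_chars max_chars (i+2)
      else
        ss[i] :: pvMergeLoop ss min_chars max_chars (i+1)
    else
      ss[i] :: pvMergeLoop ss min_chars max_chars (i+1)
  else []
termination_by ss.length - i

-- second pass of A: the body of the 'for sentence in processed_sentences' loop
def pvSplitBodyA (max_chars : Int) (acc : List (List Char)) (sentence : List Char) : List (List Char) :=
  if (Int.ofNat sentence.length) > max_chars ∧ max_chars ≠ -1 then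
    if (max (PySem.Chars.rfindFrom sentence [','] 0 (some max_chars))
            (PySem.Chars.rfindFrom sentence ['.'] 0 (some max_chars))) ≠ -1 then
      acc ++ [PySem.Chars.slice sentence none
                (some ((max (PySem.Chars.rfindFrom sentence [','] 0 (some max_chars))
                            (PySem.Chars.rfindFrom sentence ['.'] 0 (some max_chars))) + 1)),
              PySem.Chars.strip (PySem.Chars.slice sentence
                (some ((max (PySem.Chars.rfindFrom sentence [','] 0 (some max_chars))
                            (PySem.Chars.rfindFrom sentence ['.'] 0 (some max_chars))) + 2)) none)]
    else acc ++ [sentence]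
  else acc ++ [sentence]

def normalize_sentence_lengths (sentences : List String) (min_chars : Int) (max_chars : Int) : List String :=
  ((pvMergeLoop (sentences.map String.toList) min_chars max_chars 0).foldl
      (pvSplitBodyA max_chars) []).map String.ofList

-- ===== PORT B =====
-- Source B's scan 'for j, ch in enumerate(...): if ch in ",.": idx = j'
def pvScan (cs : List Char) : Int :=
  (PySem.List.enumerate cs 0).foldl (fun acc jc => if jc.2 = ',' ∨ jc.2 = '.' then jc.1 else acc) (-1 : Int)

-- Source B's emit helper: split-once by a single left-to-right scan of the bounded prefix
def pvEmitB (max_chars : Int) (s : List Char) : List (List Char) :=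
  if max_chars = -1 ∨ (Int.ofNat s.length) ≤ max_chars then [s]
  else
    let idx := pvScan (PySem.Chars.slice s none (some max_chars))
    if idx = -1 then [s]
    else [PySem.Chars.slice s none (some (idx + 1)),
          PySem.Chars.strip (PySem.Chars.slice s (some (idx + 2)) none)]

-- Source B's for-loop body: state = (out, carry)
def pvStepB (min_chars max_chars : Int) (st : List (List Char) × Option (List Char))
    (s : List Char) : List (List Char) × Option (List Char) :=
  match st.2 with
  | some c =>
      if max_chars = -1 ∨ (Int.ofNat ((c ++ [' '] ++ s).length)) ≤ max_chars then
        (st.1 ++ pvEmitB max_chars (c ++ [' '] ++ s), none)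
      else
        if (Int.ofNat s.length) < min_chars then (st.1 ++ pvEmitB max_chars c, some s)
        else (st.1 ++ pvEmitB max_chars c ++ pvEmitB max_chars s, none)
  | none =>
      if (Int.ofNat s.length) < min_chars then (st.1, some s)
      else (st.1 ++ pvEmitB max_chars s, none)

-- Source B's trailing 'if carry is not None: emit(carry)'
def pvFinB (max_chars : Int) (st : List (List Char) × Option (List Char)) : List (List Char) :=
  match st.2 with
  | some c => st.1 ++ pvEmitB max_chars c
  | none => st.1

def normalize_sentence_lengths_alt (sentences : List String) (min_chars : Int) (max_chars : Int) : List String :=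
  (pvFinB max_chars ((sentences.map String.toList).foldl (pvStepB min_chars max_chars)
      ([], none))).map String.ofList

-- ===== PRECONDITION & SPEC =====
def Spec_normalize_sentence_lengths (sentences : List String) (min_chars : Int) (max_chars : Int) (out : List String) : Prop := out = normalize_sentence_lengths_alt sentences min_chars max_chars
instance (sentences : List String) (min_chars : Int) (max_chars : Int) (out : List String) : Decidable (Spec_normalize_sentence_lengths sentences min_chars max_chars out) := by unfold Spec_normalize_sentence_lengths; infer_instance

-- ===== CLAIM (what is proved, stated in full; the proofs are below) =====
def Claim_equal_normalize_sentence_lengths : Prop := ∀ (sentences : List String) (min_chars : Int) (max_chars : Int), Dom_normalize_sentence_lengths sentences min_chars max_chars → Spec_normalize_sentence_lengths sentences min_chars max_chars (normalize_sentence_lengths sentences min_chars max_chars)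

-- ===== LEMMAS AND PROOFS =====

-- A's merge loop rephrased as structural recursion on the suffix (proof device)
def pvMergeL (min_chars max_chars : Int) : List (List Char) → List (List Char)
  | [] => []
  | [x] => [x]
  | x :: y :: t =>
    if (Int.ofNat x.length) < min_chars then
      if (Int.ofNat ((x ++ [' '] ++ y).length)) ≤ max_chars ∨ max_chars = -1 then
        (x ++ [' '] ++ y) :: pvMergeL min_chars max_chars t
      else x :: pvMergeL min_chars max_chars (y :: t)
    else x :: pvMergeL min_chars max_chars (y :: t)
termination_by l => l.length

-- ---- split equality: the scan equals max(rfind ',', rfind '.') ----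

theorem pv_go_le (s sub : List Char) (k : Nat) : PySem.Chars.rfind.go s sub k ≤ (k : Int) := by
  induction k with
  | zero => unfold PySem.Chars.rfind.go; split <;> simp
  | succ j ih =>
      unfold PySem.Chars.rfind.go
      split
      · simp
      · exact le_trans ih (by push_cast; omega)

theorem pv_isPrefixOf_single_append (d c : Char) (xs : List Char) (h : xs ≠ []) :
    [d].isPrefixOf (xs ++ [c]) = [d].isPrefixOf xs := by
  cases xs with
  | nil => exact absurd rfl h
  | cons a t => simp [List.isPrefixOf]

theorem pv_go_append (cs : List Char) (c d : Char) (k : Nat) (hk : k < cs.length) :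
    PySem.Chars.rfind.go (cs ++ [c]) [d] k = PySem.Chars.rfind.go cs [d] k := by
  induction k with
  | zero =>
      unfold PySem.Chars.rfind.go
      rw [pv_isPrefixOf_single_append d c cs (by intro h; simp [h] at hk)]
  | succ j ih =>
      unfold PySem.Chars.rfind.go
      rw [List.drop_append_of_le_length (by omega),
          pv_isPrefixOf_single_append d c (cs.drop (j+1))
            (by simp; omega),
          ih (by omega)]

theorem pv_rfind_nil (d : Char) : PySem.Chars.rfind [] [d] = -1 := by
  simp [PySem.Chars.rfind, PySem.Chars.rfind.go, List.isPrefixOf]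

theorem pv_rfind_append (cs : List Char) (c d : Char) :
    PySem.Chars.rfind (cs ++ [c]) [d] =
      if c = d then (cs.length : Int) else PySem.Chars.rfind cs [d] := by
  cases cs with
  | nil =>
      simp [PySem.Chars.rfind]
      unfold PySem.Chars.rfind.go
      unfold PySem.Chars.rfind.go
      simp [List.isPrefixOf]
      split_ifs with h1 h2 <;> simp_all
  | cons a t =>
      have hlen : ((a :: t) ++ [c]).length = (t.length + 1) + 1 := by simp
      unfold PySem.Chars.rfind
      rw [hlen]
      conv_lhs => unfold PySem.Chars.rfind.go
      have hd1 : ((a :: t) ++ [c]).drop (t.length + 1 + 1) = [] := by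
        apply List.drop_eq_nil_of_le; simp
      rw [hd1]
      simp only [List.isPrefixOf]
      conv_lhs => unfold PySem.Chars.rfind.go
      have hd2 : ((a :: t) ++ [c]).drop (t.length + 1) = [c] := by
        have : (a :: t).length = t.length + 1 := by simp
        rw [← this, List.drop_left]
      rw [hd2]
      have hrhs : (a :: t).length = (t.length) + 1 := by simp
      rw [hrhs]
      conv_rhs => rw [show PySem.Chars.rfind.go (a :: t) [d] (t.length + 1)
        = if [d].isPrefixOf ((a :: t).drop (t.length + 1)) then ((t.length + 1 : Nat) : Int)
          else PySem.Chars.rfind.go (a :: t) [d] t.length from by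
            conv_lhs => unfold PySem.Chars.rfind.go]
      have hd3 : (a :: t).drop (t.length + 1) = [] := by
        apply List.drop_eq_nil_of_le; simp
      rw [hd3]
      simp only [List.isPrefixOf, Bool.and_true]
      by_cases hc : c = d
      · subst hc; simp
      · have hdc : (d == c) = false := by
          simp only [beq_eq_false_iff_ne, ne_eq]; exact fun h => hc h.symm
        simp only [hdc, hc, Bool.false_eq_true, if_false]
        exact pv_go_append (a :: t) c d t.length (by simp)

theorem pv_rfind_le (cs : List Char) (d : Char) :
    PySem.Chars.rfind cs [d] ≤ (cs.length : Int) := pv_go_le _ _ _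

theorem pv_scan_append (cs : List Char) (c : Char) :
    pvScan (cs ++ [c]) = if c = ',' ∨ c = '.' then (cs.length : Int) else pvScan cs := by
  unfold pvScan
  rw [PySem.List.enumerate_append, List.foldl_append]
  simp [PySem.List.enumerate]

theorem pv_scan_eq_max (cs : List Char) :
    pvScan cs = max (PySem.Chars.rfind cs [',']) (PySem.Chars.rfind cs ['.']) := by
  induction cs using List.reverseRecOn with
  | nil => simp [pvScan, PySem.List.enumerate, pv_rfind_nil]
  | append_singleton t c ih =>
      rw [pv_scan_append, pv_rfind_append, pv_rfind_append]
      by_cases h1 : c = ','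
      · subst h1
        have h2 : ¬ (',' = '.') := by decide
        simp only [if_neg h2]
        simp only [true_or, if_pos]
        have := pv_rfind_le t '.'
        omega
      · by_cases h2 : c = '.'
        · subst h2
          have h1' : ¬ ('.' = ',') := by decide
          simp only [if_neg h1']
          simp only [or_true, if_pos]
          have := pv_rfind_le t ','
          omega
        · simp only [if_neg h1, if_neg h2, if_neg (by tauto : ¬ (c = ',' ∨ c = '.'))]
          exact ih

theorem pv_rfindFrom_eq_rfind_slice (s sub : List Char) (m : Int) :
    PySem.Chars.rfindFrom s sub 0 (some m) =
      PySem.Chars.rfind (PySem.List.slice s none (some m)) sub := by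
  unfold PySem.Chars.rfindFrom PySem.List.slice PySem.List.clampIdx
  simp only
  have hle : ¬ ((0:Int) < 0) := by omega
  rw [if_neg hle]
  set e : Int := if (s.length : Int) < m then (s.length : Int)
    else if m < 0 then (if m + s.length < 0 then 0 else m + s.length) else m with he
  have he0 : 0 ≤ e := by
    rw [he]; split_ifs <;> omega
  rw [if_neg (by omega : ¬ e < (0:Int))]
  have hreg : (List.take e.toNat s).drop (0:Int).toNat = List.take e.toNat s := by simp
  rw [hreg]
  have hkey : ((if m < 0 then if (s.length:Int) + m < 0 then 0 else ((s.length:Int) + m).toNat else min m.toNat s.length) - 0) = e.toNat := by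
    rw [he]; split_ifs <;> omega
  rw [List.drop_zero, hkey]
  by_cases hr : PySem.Chars.rfind (List.take e.toNat s) sub = -1
  · rw [if_pos hr, hr]
  · rw [if_neg hr, zero_add]

-- per-sentence: A's split body appends exactly B's emit pieces
theorem pvSplitBodyA_eq (max_chars : Int) (acc : List (List Char)) (s : List Char) :
    pvSplitBodyA max_chars acc s = acc ++ pvEmitB max_chars s := by
  have hR : pvScan (PySem.Chars.slice s none (some max_chars))
      = max (PySem.Chars.rfindFrom s [','] 0 (some max_chars))
            (PySem.Chars.rfindFrom s ['.'] 0 (some max_chars)) := by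
    rw [pv_rfindFrom_eq_rfind_slice, pv_rfindFrom_eq_rfind_slice,
        PySem.Chars.slice_eq_listSlice, pv_scan_eq_max]
  unfold pvSplitBodyA pvEmitB
  by_cases hg : (Int.ofNat s.length) > max_chars ∧ max_chars ≠ -1
  · rw [if_pos hg, if_neg (by omega : ¬ (max_chars = -1 ∨ (Int.ofNat s.length) ≤ max_chars))]
    simp only [hR]
    by_cases hidx : max (PySem.Chars.rfindFrom s [','] 0 (some max_chars))
        (PySem.Chars.rfindFrom s ['.'] 0 (some max_chars)) = -1
    · rw [if_neg (not_not_intro hidx), if_pos hidx]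
    · rw [if_pos hidx, if_neg hidx]
  · rw [if_neg hg, if_pos (by omega : (max_chars = -1 ∨ (Int.ofNat s.length) ≤ max_chars))]

-- A's index loop is the structural merge recursion
theorem pv_mergeLoop_eq (ss : List (List Char)) (mn mx : Int) (i : Nat) :
    pvMergeLoop ss mn mx i = pvMergeL mn mx (ss.drop i) := by
  have H : ∀ n i, ss.length - i ≤ n → pvMergeLoop ss mn mx i = pvMergeL mn mx (ss.drop i) := by
    intro n
    induction n with
    | zero =>
        intro i hi
        rw [pvMergeLoop, dif_neg (by omega), List.drop_eq_nil_of_le (by omega)]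
        simp [pvMergeL]
    | succ n ih =>
        intro i hi
        rw [pvMergeLoop]
        by_cases h : i < ss.length
        · rw [dif_pos h]
          have hdrop : ss.drop i = ss[i] :: ss.drop (i+1) := List.drop_eq_getElem_cons h
          by_cases h2 : (Int.ofNat (ss[i]).length) < mn ∧ i + 1 < ss.length
          · rw [dif_pos h2]
            have hdrop2 : ss.drop (i+1) = ss[i+1] :: ss.drop (i+2) := List.drop_eq_getElem_cons h2.2
            rw [hdrop, hdrop2, pvMergeL, if_pos h2.1]
            by_cases h3 : (Int.ofNat ((ss[i] ++ [' '] ++ ss[i+1]'h2.2).length)) ≤ mx ∨ mx = -1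
            · rw [if_pos h3, if_pos h3, ih (i+2) (by omega)]
            · rw [if_neg h3, if_neg h3, ih (i+1) (by omega), hdrop2]
          · rw [dif_neg h2, ih (i+1) (by omega), hdrop]
            by_cases h4 : i + 1 < ss.length
            · have hs : ¬ (Int.ofNat (ss[i]).length) < mn := fun hc => h2 ⟨hc, h4⟩
              have hdrop2 : ss.drop (i+1) = ss[i+1] :: ss.drop (i+2) := List.drop_eq_getElem_cons h4
              rw [hdrop2, pvMergeL, if_neg hs, ← hdrop2]
            · rw [List.drop_eq_nil_of_le (by omega : ss.length ≤ i + 1)]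
              simp [pvMergeL]
        · rw [dif_neg h, List.drop_eq_nil_of_le (by omega)]
          simp [pvMergeL]
  exact H (ss.length - i) i le_rfl

theorem pv_mergeL_cons_long (mn mx : Int) (s : List Char) (t : List (List Char))
    (h : ¬ (Int.ofNat s.length) < mn) :
    pvMergeL mn mx (s :: t) = s :: pvMergeL mn mx t := by
  cases t with
  | nil => simp [pvMergeL]
  | cons y t' => rw [pvMergeL, if_neg h]

-- the carry fold computes emit-of-every-merge-unit
theorem pv_fold_eq (mn mx : Int) (l : List (List Char)) (out : List (List Char))
    (co : Option (List Char)) (hco : ∀ c, co = some c → (Int.ofNat c.length) < mn) :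
    pvFinB mx (l.foldl (pvStepB mn mx) (out, co))
      = out ++ (pvMergeL mn mx (co.toList ++ l)).flatMap (pvEmitB mx) := by
  induction l generalizing out co with
  | nil =>
      cases co with
      | none => simp [pvFinB, pvMergeL]
      | some c => simp [pvFinB, pvMergeL]
  | cons s t ih =>
      cases co with
      | none =>
          rw [List.foldl_cons]
          by_cases hs : (Int.ofNat s.length) < mn
          · have hstep : pvStepB mn mx (out, none) s = (out, some s) := by
              unfold pvStepB; dsimp only; rw [if_pos hs]
            rw [hstep, ih out (some s) (by intro c hc; cases hc; exact hs)]
            simp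
          · have hstep : pvStepB mn mx (out, none) s = (out ++ pvEmitB mx s, none) := by
              unfold pvStepB; dsimp only; rw [if_neg hs]
            rw [hstep, ih _ none (by intro c hc; cases hc)]
            simp only [Option.toList_none, List.nil_append]
            rw [pv_mergeL_cons_long mn mx s t hs]
            simp [List.append_assoc]
      | some c =>
          have hc' := hco c rfl
          rw [List.foldl_cons]
          by_cases hfit : mx = -1 ∨ (Int.ofNat ((c ++ [' '] ++ s).length)) ≤ mx
          · have hstep : pvStepB mn mx (out, some c) s
                = (out ++ pvEmitB mx (c ++ [' '] ++ s), none) := by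
              unfold pvStepB; dsimp only; rw [if_pos hfit]
            rw [hstep, ih _ none (by intro c' hc2; cases hc2)]
            simp only [Option.toList_none, Option.toList_some, List.nil_append, List.cons_append]
            rw [show pvMergeL mn mx (c :: s :: t) = (c ++ [' '] ++ s) :: pvMergeL mn mx t from by
                  rw [pvMergeL, if_pos hc', if_pos (by tauto)]]
            simp [List.append_assoc]
          · have hm : pvMergeL mn mx (c :: s :: t) = c :: pvMergeL mn mx (s :: t) := by
              rw [pvMergeL, if_pos hc', if_neg (by tauto)]
            by_cases hs : (Int.ofNat s.length) < mn
            · have hstep : pvStepB mn mx (out, some c) s = (out ++ pvEmitB mx c, some s) := by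
                unfold pvStepB; dsimp only; rw [if_neg hfit, if_pos hs]
              rw [hstep, ih _ (some s) (by intro c' hc2; cases hc2; exact hs)]
              simp only [Option.toList_some, List.cons_append, List.nil_append]
              rw [hm]
              simp [List.append_assoc]
            · have hstep : pvStepB mn mx (out, some c) s
                  = (out ++ pvEmitB mx c ++ pvEmitB mx s, none) := by
                unfold pvStepB; dsimp only; rw [if_neg hfit, if_neg hs]
              rw [hstep, ih _ none (by intro c' hc2; cases hc2)]
              simp only [Option.toList_none, Option.toList_some, List.nil_append, List.cons_append]
              rw [hm, pv_mergeL_cons_long mn mx s t hs]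
              simp [List.append_assoc]

-- ===== VERDICT (by name: the statement is the Claim_ definition above) =====
theorem normalize_sentence_lengths_spec : Claim_equal_normalize_sentence_lengths := by
  intro sentences min_chars max_chars _
  unfold Spec_normalize_sentence_lengths normalize_sentence_lengths normalize_sentence_lengths_alt
  rw [pv_fold_eq min_chars max_chars _ [] none (by intro c h; cases h), pv_mergeLoop_eq]
  simp only [List.drop_zero, Option.toList_none, List.nil_append]
  congr 1
  rw [show pvSplitBodyA max_chars = fun acc s => acc ++ pvEmitB max_chars s from
        funext fun acc => funext fun s => pvSplitBodyA_eq max_chars acc s,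
      PySem.List.foldl_append_eq_flatMap, List.nil_append]
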